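-- pv_equiv track=rewrite | github.com/Air2air/z-beam-generator | scripts/data/normalize_associations.py | rebuild_indexes
-- ===== SOURCE A (Python) =====
-- from collections import defaultdict
--
-- def rebuild_indexes(associations: list[dict]) -> dict:
--     """Rebuild all lookup index dictionaries from normalized flat list."""
--     m2c: dict[str, list[str]] = defaultdict(list)   # material (bare) → [contaminant_ids]
--     c2m: dict[str, list[str]] = defaultdict(list)   # contaminant_id → [material_bare_ids]
--
--     seen_m2c: dict[str, set[str]] = defaultdict(set)
--     seen_c2m: dict[str, set[str]] = defaultdict(set)
--
--     for a in associations: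
--         rt = a.get("relationship_type")
--         src = a.get("source_id", "")
--         tgt = a.get("target_id", "")
--
--         if rt == "can_have_contamination":
--             # src = material (bare), tgt = contaminant
--             if tgt not in seen_m2c[src]:
--                 seen_m2c[src].add(tgt)
--                 m2c[src].append(tgt)
--         elif rt == "can_contaminate":
--             # src = contaminant, tgt = material (bare)
--             if tgt not in seen_c2m[src]:
--                 seen_c2m[src].add(tgt)
--                 c2m[src].append(tgt)
--
--     return {
--         "material_to_contaminant": dict(m2c),
--         "material_to_compound": {},         # not yet populated
--         "material_to_setting": {},           # not yet populated
--         "contaminant_to_material": dict(c2m),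
--         "compound_to_material": {},          # not yet populated
--         "setting_to_material": {},           # not yet populated
--     }
-- ===== SOURCE B (Python) =====
-- def rebuild_indexes(associations: list[dict]) -> dict:
--     """Rebuild all lookup index dictionaries from normalized flat list."""
--     # Staged pipeline per direction: project to (src, tgt) pairs, dedup the pair
--     # stream keeping first occurrences (dict.fromkeys), then group by source.
--     def index_for(rel: str) -> dict:
--         pairs = [(a.get("source_id", ""), a.get("target_id", ""))
--                  for a in associations
--                  if a.get("relationship_type") == rel]
--         out: dict = {}
--         for src, tgt in dict.fromkeys(pairs):
--             out.setdefault(src, []).append(tgt)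
--         return out
--
--     return {
--         "material_to_contaminant": index_for("can_have_contamination"),
--         "material_to_compound": {},
--         "material_to_setting": {},
--         "contaminant_to_material": index_for("can_contaminate"),
--         "compound_to_material": {},
--         "setting_to_material": {},
--     }
-- ===== Notes on version B (the rewrite author's own statement) =====
-- stated objective: simpler
-- what changed: Replaces A's single pass maintaining four parallel defaultdicts (lists plus per-key seen-sets with an explicit membership branch) by a staged pipeline run once per direction: project matching records to (src, tgt) pairs, dedup the pair stream with dict.fromkeys keeping first occurrences, then group by source.
import Mathlib
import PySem

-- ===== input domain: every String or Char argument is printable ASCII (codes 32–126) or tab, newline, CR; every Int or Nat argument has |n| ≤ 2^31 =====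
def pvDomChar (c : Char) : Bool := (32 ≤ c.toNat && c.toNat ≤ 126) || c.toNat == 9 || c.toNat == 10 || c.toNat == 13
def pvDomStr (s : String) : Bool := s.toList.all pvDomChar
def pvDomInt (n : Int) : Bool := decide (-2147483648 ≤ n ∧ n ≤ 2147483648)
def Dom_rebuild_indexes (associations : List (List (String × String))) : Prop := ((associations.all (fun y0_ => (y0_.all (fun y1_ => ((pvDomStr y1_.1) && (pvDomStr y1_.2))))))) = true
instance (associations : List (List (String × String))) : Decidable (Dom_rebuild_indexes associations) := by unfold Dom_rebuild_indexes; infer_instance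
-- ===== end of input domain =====

-- B replaces A's single pass with four parallel defaultdicts by a staged pipeline run once
-- per direction: project the matching records to (src, tgt) pairs, dedup the pair stream
-- keeping first occurrences (dict.fromkeys), then group by source; objective: simpler.

-- ===== PORT A =====
-- state: (m2c, c2m, seen_m2c, seen_c2m)
def stepA (st : PySem.Dict String (List String) × PySem.Dict String (List String) ×
                PySem.Dict String (PySem.Set String) × PySem.Dict String (PySem.Set String))
    (a : List (String × String)) :
    PySem.Dict String (List String) × PySem.Dict String (List String) ×
    PySem.Dict String (PySem.Set String) × PySem.Dict String (PySem.Set String) :=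
  let d := PySem.Dict.mk a
  let rt := d.get? "relationship_type"
  let src := d.getD "source_id" ""
  let tgt := d.getD "target_id" ""
  match st with
  | (m2c, c2m, sm, sc) =>
    if rt = some "can_have_contamination" then
      if (sm.getD src PySem.Set.empty).contains tgt then (m2c, c2m, sm, sc)
      else (m2c.insert src (m2c.getD src [] ++ [tgt]), c2m,
            sm.insert src ((sm.getD src PySem.Set.empty).add tgt), sc)
    else if rt = some "can_contaminate" then
      if (sc.getD src PySem.Set.empty).contains tgt then (m2c, c2m, sm, sc)
      else (m2c, c2m.insert src (c2m.getD src [] ++ [tgt]), sm,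
            sc.insert src ((sc.getD src PySem.Set.empty).add tgt))
    else (m2c, c2m, sm, sc)

def rebuild_indexes (associations : List (List (String × String))) :
    List (String × List (String × List String)) :=
  let st := associations.foldl stepA (PySem.Dict.empty, PySem.Dict.empty, PySem.Dict.empty, PySem.Dict.empty)
  [("material_to_contaminant", st.1.items),
   ("material_to_compound", []),
   ("material_to_setting", []),
   ("contaminant_to_material", st.2.1.items),
   ("compound_to_material", []),
   ("setting_to_material", [])]

-- ===== PORT B =====
-- the list comprehension: records of the given relationship type, projected to (src, tgt)
def pairsFor (associations : List (List (String × String))) (rel : String) :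
    List (String × String) :=
  (associations.filter (fun a => (PySem.Dict.mk a).get? "relationship_type" == some rel)).map
    (fun a => ((PySem.Dict.mk a).getD "source_id" "", (PySem.Dict.mk a).getD "target_id" ""))

-- the grouping loop: out.setdefault(src, []).append(tgt) == out[src] = out.get(src, []) + [tgt]
def groupPairs (ps : List (String × String)) : PySem.Dict String (List String) :=
  ps.foldl (fun out p => out.insert p.1 (out.getD p.1 [] ++ [p.2])) PySem.Dict.empty

-- index_for(rel): group the deduped (dict.fromkeys) pair stream
def indexFor (associations : List (List (String × String))) (rel : String) :
    PySem.Dict String (List String) :=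
  groupPairs (PySem.List.dedup (pairsFor associations rel))

def rebuild_indexes_alt (associations : List (List (String × String))) :
    List (String × List (String × List String)) :=
  [("material_to_contaminant", (indexFor associations "can_have_contamination").items),
   ("material_to_compound", []),
   ("material_to_setting", []),
   ("contaminant_to_material", (indexFor associations "can_contaminate").items),
   ("compound_to_material", []),
   ("setting_to_material", [])]

-- ===== PRECONDITION & SPEC =====
def Spec_rebuild_indexes (associations : List (List (String × String))) (out : List (String × List (String × List String))) : Prop := out = rebuild_indexes_alt associations
instance (associations : List (List (String × String))) (out : List (String × List (String × List String))) : Decidable (Spec_rebuild_indexes associations out) := by unfold Spec_rebuild_indexes; infer_instance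

-- ===== CLAIM =====
def Claim_equal_rebuild_indexes : Prop := ∀ (associations : List (List (String × String))), Dom_rebuild_indexes associations → Spec_rebuild_indexes associations (rebuild_indexes associations)

-- ===== LEMMAS AND PROOFS =====

-- invariant tying one (list-dict, seen-set-dict) pair of A's state to the deduped pair list P
def InvAB (m : PySem.Dict String (List String)) (s : PySem.Dict String (PySem.Set String))
    (P : List (String × String)) : Prop :=
  m = groupPairs P ∧ ∀ k t, t ∈ s.getD k PySem.Set.empty ↔ (k, t) ∈ P

theorem Inv_empty : InvAB PySem.Dict.empty PySem.Dict.empty [] := by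
  refine ⟨rfl, fun k t => ?_⟩
  rw [PySem.Dict.getD_empty]
  simp [PySem.Set.empty]

theorem groupPairs_append_singleton (P : List (String × String)) (p : String × String) :
    groupPairs (P ++ [p]) =
      (groupPairs P).insert p.1 ((groupPairs P).getD p.1 [] ++ [p.2]) := by
  unfold groupPairs
  rw [List.foldl_append]
  rfl

-- one branch of A's loop body advances the invariant by Set.add on the pair list
theorem Inv_step (m : PySem.Dict String (List String)) (s : PySem.Dict String (PySem.Set String))
    (P : List (String × String)) (src tgt : String) (h : InvAB m s P) :
    InvAB (if (s.getD src PySem.Set.empty).contains tgt then m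
         else m.insert src (m.getD src [] ++ [tgt]))
        (if (s.getD src PySem.Set.empty).contains tgt then s
         else s.insert src ((s.getD src PySem.Set.empty).add tgt))
        (PySem.Set.add P (src, tgt)) := by
  obtain ⟨hm, hs⟩ := h
  by_cases hmem : (src, tgt) ∈ P
  · have hc : (s.getD src PySem.Set.empty).contains tgt = true := by
      rw [PySem.Set.contains_iff, hs]; exact hmem
    rw [hc, if_pos rfl, if_pos rfl, PySem.Set.add_of_mem hmem]
    exact ⟨hm, hs⟩
  · have hc : (s.getD src PySem.Set.empty).contains tgt = false := by
      rw [Bool.eq_false_iff]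
      intro hcon
      exact hmem ((hs src tgt).mp ((PySem.Set.contains_iff _ _).mp hcon))
    rw [hc, if_neg (by simp), if_neg (by simp), PySem.Set.add_of_not_mem hmem]
    constructor
    · rw [hm, groupPairs_append_singleton]
    · intro k t
      rw [PySem.Dict.getD_insert]
      by_cases hk : k = src
      · subst hk
        rw [if_pos rfl, PySem.Set.mem_add]
        constructor
        · rintro (h1 | rfl)
          · exact List.mem_append_left _ ((hs k t).mp h1)
          · exact List.mem_append_right _ (by simp)
        · intro h1
          rcases List.mem_append.mp h1 with h1 | h1
          · exact Or.inl ((hs k t).mpr h1)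
          · simp at h1; exact Or.inr h1
      · rw [if_neg hk]
        constructor
        · intro h1
          exact List.mem_append_left _ ((hs k t).mp h1)
        · intro h1
          rcases List.mem_append.mp h1 with h1 | h1
          · exact (hs k t).mpr h1
          · simp at h1; exact absurd h1.1 hk

-- the main loop invariant: A's fold over the records tracks B's per-direction pair folds
theorem loop_inv (l : List (List (String × String)))
    (st : PySem.Dict String (List String) × PySem.Dict String (List String) ×
          PySem.Dict String (PySem.Set String) × PySem.Dict String (PySem.Set String))
    (P1 P2 : List (String × String))
    (h1 : InvAB st.1 st.2.2.1 P1) (h2 : InvAB st.2.1 st.2.2.2 P2) :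
    InvAB (l.foldl stepA st).1 (l.foldl stepA st).2.2.1
        ((pairsFor l "can_have_contamination").foldl PySem.Set.add P1) ∧
    InvAB (l.foldl stepA st).2.1 (l.foldl stepA st).2.2.2
        ((pairsFor l "can_contaminate").foldl PySem.Set.add P2) := by
  induction l generalizing st P1 P2 with
  | nil => exact ⟨h1, h2⟩
  | cons a t ih =>
    obtain ⟨m2c, c2m, sm, sc⟩ := st
    simp only [List.foldl_cons, pairsFor, List.filter_cons]
    by_cases hr1 : (PySem.Dict.mk a).get? "relationship_type" = some "can_have_contamination"
    · have hb1 : ((PySem.Dict.mk a).get? "relationship_type" == some "can_have_contamination") = true := by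
        simp [hr1]
      have hb2 : ((PySem.Dict.mk a).get? "relationship_type" == some "can_contaminate") = false := by
        simp [hr1]
      rw [hb1, hb2]
      have hstep := Inv_step m2c sm P1 ((PySem.Dict.mk a).getD "source_id" "")
        ((PySem.Dict.mk a).getD "target_id" "") h1
      have hA : stepA (m2c, c2m, sm, sc) a =
          (if (sm.getD ((PySem.Dict.mk a).getD "source_id" "") PySem.Set.empty).contains
              ((PySem.Dict.mk a).getD "target_id" "") then (m2c, c2m, sm, sc)
           else (m2c.insert ((PySem.Dict.mk a).getD "source_id" "")
                   (m2c.getD ((PySem.Dict.mk a).getD "source_id" "") [] ++ [(PySem.Dict.mk a).getD "target_id" ""]),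
                 c2m,
                 sm.insert ((PySem.Dict.mk a).getD "source_id" "")
                   ((sm.getD ((PySem.Dict.mk a).getD "source_id" "") PySem.Set.empty).add
                     ((PySem.Dict.mk a).getD "target_id" "")), sc)) := by
        unfold stepA
        dsimp only
        rw [if_pos hr1]
      rw [hA]
      split
      · rename_i hcond
        rw [hcond] at hstep
        rw [if_pos rfl] at hstep
        exact ih _ _ _ hstep h2
      · rename_i hcond
        rw [Bool.not_eq_true] at hcond
        rw [hcond] at hstep
        simp only [Bool.false_eq_true, if_neg (by simp : ¬ (False : Prop))] at hstep
        exact ih _ _ _ hstep h2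
    · by_cases hr2 : (PySem.Dict.mk a).get? "relationship_type" = some "can_contaminate"
      · have hb1 : ((PySem.Dict.mk a).get? "relationship_type" == some "can_have_contamination") = false := by
          simp [hr2]
        have hb2 : ((PySem.Dict.mk a).get? "relationship_type" == some "can_contaminate") = true := by
          simp [hr2]
        rw [hb1, hb2]
        have hstep := Inv_step c2m sc P2 ((PySem.Dict.mk a).getD "source_id" "")
          ((PySem.Dict.mk a).getD "target_id" "") h2
        have hA : stepA (m2c, c2m, sm, sc) a =
            (if (sc.getD ((PySem.Dict.mk a).getD "source_id" "") PySem.Set.empty).contains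
                ((PySem.Dict.mk a).getD "target_id" "") then (m2c, c2m, sm, sc)
             else (m2c,
                   c2m.insert ((PySem.Dict.mk a).getD "source_id" "")
                     (c2m.getD ((PySem.Dict.mk a).getD "source_id" "") [] ++ [(PySem.Dict.mk a).getD "target_id" ""]),
                   sm,
                   sc.insert ((PySem.Dict.mk a).getD "source_id" "")
                     ((sc.getD ((PySem.Dict.mk a).getD "source_id" "") PySem.Set.empty).add
                       ((PySem.Dict.mk a).getD "target_id" "")))) := by
          unfold stepA
          dsimp only
          rw [if_neg hr1, if_pos hr2]
        rw [hA]
        split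
        · rename_i hcond
          rw [hcond] at hstep
          rw [if_pos rfl] at hstep
          exact ih _ _ _ h1 hstep
        · rename_i hcond
          rw [Bool.not_eq_true] at hcond
          rw [hcond] at hstep
          simp only [Bool.false_eq_true, if_neg (by simp : ¬ (False : Prop))] at hstep
          exact ih _ _ _ h1 hstep
      · have hb1 : ((PySem.Dict.mk a).get? "relationship_type" == some "can_have_contamination") = false := by
          simp [hr1]
        have hb2 : ((PySem.Dict.mk a).get? "relationship_type" == some "can_contaminate") = false := by
          simp [hr2]
        rw [hb1, hb2]
        have hA : stepA (m2c, c2m, sm, sc) a = (m2c, c2m, sm, sc) := by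
          unfold stepA
          dsimp only
          rw [if_neg hr1, if_neg hr2]
        rw [hA]
        exact ih _ _ _ h1 h2

theorem dedup_eq_foldl_add (xs : List (String × String)) :
    PySem.List.dedup xs = xs.foldl PySem.Set.add [] := by
  rw [PySem.List.dedup_eq_ofList, PySem.Set.ofList_eq_foldl]

-- ===== VERDICT =====
theorem rebuild_indexes_spec : Claim_equal_rebuild_indexes := by
  intro associations _
  unfold Spec_rebuild_indexes rebuild_indexes rebuild_indexes_alt indexFor
  have h := loop_inv associations
    (PySem.Dict.empty, PySem.Dict.empty, PySem.Dict.empty, PySem.Dict.empty)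
    [] [] Inv_empty Inv_empty
  obtain ⟨⟨hm1, _⟩, ⟨hm2, _⟩⟩ := h
  rw [dedup_eq_foldl_add, dedup_eq_foldl_add]
  simp only []
  rw [hm1, hm2]
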